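-- pv_equiv track=rewrite | github.com/srihari-122/Job-portal | ai_resume_analyzer.py | _get_backend_recommendations
-- ===== SOURCE A (Python) =====
-- from typing import Dict, List, Any
--
-- def _get_backend_recommendations(skills: List[str], experience: int) -> List[str]:
--     """Backend specific recommendations"""
--     recommendations = []
--
--     if not any('api' in skill or 'rest' in skill for skill in skills):
--         recommendations.append("Master RESTful API design and development")
--     if not any('database' in skill or 'sql' in skill for skill in skills):
--         recommendations.append("Advanced database design and optimization")
--     if not any('microservices' in skill for skill in skills):
--         recommendations.append("Learn microservices architecture patterns")
--     if not any('security' in skill or 'auth' in skill for skill in skills):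
--         recommendations.append("Implement security best practices and authentication")
--     if not any('docker' in skill or 'kubernetes' in skill for skill in skills):
--         recommendations.append("Containerization and orchestration technologies")
--
--     return recommendations
-- ===== SOURCE B (Python) =====
-- from typing import List
--
-- _RULES = [
--     (("api", "rest"), "Master RESTful API design and development"),
--     (("database", "sql"), "Advanced database design and optimization"),
--     (("microservices",), "Learn microservices architecture patterns"),
--     (("security", "auth"), "Implement security best practices and authentication"),
--     (("docker", "kubernetes"), "Containerization and orchestration technologies"),
-- ]
--
-- def _get_backend_recommendations(skills: List[str], experience: int) -> List[str]:
--     """Single pass over skills maintaining per-category 'found' flags."""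
--     found = [False] * len(_RULES)
--     for skill in skills:
--         for i, (keywords, _) in enumerate(_RULES):
--             found[i] = found[i] or any(k in skill for k in keywords)
--     return [rec for f, (_, rec) in zip(found, _RULES) if not f]
-- ===== Notes on version B (the rewrite author's own statement) =====
-- stated objective: alternative
-- what changed: Replaces five separate any()-scans of skills (one per category) with a single pass over skills that maintains a per-category found-flag table driven by a keyword rule list, emitting the recommendations of unfound categories afterwards.
import Mathlib
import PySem

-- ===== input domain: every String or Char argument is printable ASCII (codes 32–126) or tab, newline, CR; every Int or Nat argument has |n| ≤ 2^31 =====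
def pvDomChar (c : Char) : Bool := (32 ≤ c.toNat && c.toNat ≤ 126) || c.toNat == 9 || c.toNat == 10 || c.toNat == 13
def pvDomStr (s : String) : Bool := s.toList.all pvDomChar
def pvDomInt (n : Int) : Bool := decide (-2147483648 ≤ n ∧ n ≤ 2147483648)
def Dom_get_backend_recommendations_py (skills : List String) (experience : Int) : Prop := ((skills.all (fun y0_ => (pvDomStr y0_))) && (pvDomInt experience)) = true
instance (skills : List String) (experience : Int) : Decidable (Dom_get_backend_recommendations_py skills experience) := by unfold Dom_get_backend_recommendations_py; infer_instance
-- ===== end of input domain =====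

-- ===== PORT A =====
-- A: five independent any()-scans of skills, one per keyword category, appending in fixed order.
def get_backend_recommendations_py (skills : List String) (experience : Int) : List String :=
  let recommendations : List String := []
  let recommendations := if !(skills.any (fun skill => PySem.Str.isIn "api" skill || PySem.Str.isIn "rest" skill))
    then recommendations ++ ["Master RESTful API design and development"] else recommendations
  let recommendations := if !(skills.any (fun skill => PySem.Str.isIn "database" skill || PySem.Str.isIn "sql" skill))
    then recommendations ++ ["Advanced database design and optimization"] else recommendations
  let recommendations := if !(skills.any (fun skill => PySem.Str.isIn "microservices" skill))
    then recommendations ++ ["Learn microservices architecture patterns"] else recommendations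
  let recommendations := if !(skills.any (fun skill => PySem.Str.isIn "security" skill || PySem.Str.isIn "auth" skill))
    then recommendations ++ ["Implement security best practices and authentication"] else recommendations
  let recommendations := if !(skills.any (fun skill => PySem.Str.isIn "docker" skill || PySem.Str.isIn "kubernetes" skill))
    then recommendations ++ ["Containerization and orchestration technologies"] else recommendations
  recommendations

-- ===== PORT B =====
-- B: single pass over skills maintaining per-category found flags over a rule table (alternative decomposition; same behaviour).
def pvRules : List (List String × String) :=
  [ (["api", "rest"], "Master RESTful API design and development"),
    (["database", "sql"], "Advanced database design and optimization"),
    (["microservices"], "Learn microservices architecture patterns"),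
    (["security", "auth"], "Implement security best practices and authentication"),
    (["docker", "kubernetes"], "Containerization and orchestration technologies") ]

def get_backend_recommendations_py_alt (skills : List String) (experience : Int) : List String :=
  let found := skills.foldl
    (fun found skill =>
      (found.zip pvRules).map
        (fun p => p.1 || (p.2.1.any (fun k => PySem.Str.isIn k skill))))
    (pvRules.map (fun _ => false))
  ((found.zip pvRules).filter (fun p => !p.1)).map (fun p => p.2.2)

-- ===== PRECONDITION & SPEC =====
def Spec_get_backend_recommendations_py (skills : List String) (experience : Int) (out : List String) : Prop := out = get_backend_recommendations_py_alt skills experience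
instance (skills : List String) (experience : Int) (out : List String) : Decidable (Spec_get_backend_recommendations_py skills experience out) := by unfold Spec_get_backend_recommendations_py; infer_instance

-- ===== CLAIM (what is proved, stated in full; the proofs are below) =====
def Claim_equal_get_backend_recommendations_py : Prop := ∀ (skills : List String) (experience : Int), Dom_get_backend_recommendations_py skills experience → Spec_get_backend_recommendations_py skills experience (get_backend_recommendations_py skills experience)

-- ===== LEMMAS AND PROOFS =====
theorem pv_fold_flags (skills : List String) (b1 b2 b3 b4 b5 : Bool) :
    skills.foldl
      (fun found skill =>
        (found.zip pvRules).map
          (fun p => p.1 || (p.2.1.any (fun k => PySem.Str.isIn k skill))))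
      [b1, b2, b3, b4, b5] =
    [ b1 || skills.any (fun s => PySem.Str.isIn "api" s || PySem.Str.isIn "rest" s),
      b2 || skills.any (fun s => PySem.Str.isIn "database" s || PySem.Str.isIn "sql" s),
      b3 || skills.any (fun s => PySem.Str.isIn "microservices" s),
      b4 || skills.any (fun s => PySem.Str.isIn "security" s || PySem.Str.isIn "auth" s),
      b5 || skills.any (fun s => PySem.Str.isIn "docker" s || PySem.Str.isIn "kubernetes" s) ] := by
  induction skills generalizing b1 b2 b3 b4 b5 with
  | nil => simp
  | cons s rest ih =>
      rw [List.foldl_cons]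
      have hstep :
          (([b1, b2, b3, b4, b5].zip pvRules).map
              (fun p => p.1 || (p.2.1.any (fun k => PySem.Str.isIn k s)))) =
          [ b1 || (PySem.Str.isIn "api" s || PySem.Str.isIn "rest" s),
            b2 || (PySem.Str.isIn "database" s || PySem.Str.isIn "sql" s),
            b3 || PySem.Str.isIn "microservices" s,
            b4 || (PySem.Str.isIn "security" s || PySem.Str.isIn "auth" s),
            b5 || (PySem.Str.isIn "docker" s || PySem.Str.isIn "kubernetes" s) ] := by
        simp [pvRules]
      rw [hstep, ih]
      simp [List.any_cons, Bool.or_assoc]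

-- ===== VERDICT (by name: the statement is the Claim_ definition above) =====
theorem get_backend_recommendations_py_spec : Claim_equal_get_backend_recommendations_py := by
  intro skills experience _
  unfold Spec_get_backend_recommendations_py
  unfold get_backend_recommendations_py get_backend_recommendations_py_alt
  rw [show (pvRules.map (fun _ => false)) = [false, false, false, false, false] from rfl]
  rw [pv_fold_flags]
  cases h1 : skills.any (fun s => PySem.Str.isIn "api" s || PySem.Str.isIn "rest" s) <;>
  cases h2 : skills.any (fun s => PySem.Str.isIn "database" s || PySem.Str.isIn "sql" s) <;>
  cases h3 : skills.any (fun s => PySem.Str.isIn "microservices" s) <;>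
  cases h4 : skills.any (fun s => PySem.Str.isIn "security" s || PySem.Str.isIn "auth" s) <;>
  cases h5 : skills.any (fun s => PySem.Str.isIn "docker" s || PySem.Str.isIn "kubernetes" s) <;>
  simp [pvRules]
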